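-- pv_equiv track=rewrite | github.com/tfiling/cracking_the_coding_interview | py_soltions/amazon/amazon3.py | beautifulCoinFlips
-- ===== SOURCE A (Python) =====
-- def beautifulCoinFlips(coins):
--     tails_prefix = []
--     count = 0
--     for c in coins:
--         if c == "T":
--             count += 1
--         tails_prefix.append(count)
--     heads_postfix = [0] * len(coins)
--     count = 0
--     for i in range(len(coins) -1, -1, -1):
--         if coins[i] == "H":
--             count += 1
--         heads_postfix[i] = count
--     return min(tails + heads for tails, heads in zip(tails_prefix, heads_postfix)) - 1
-- ===== SOURCE B (Python) =====
-- def beautifulCoinFlips(coins):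
--     total_heads = coins.count("H")
--     def values():
--         tails = 0
--         heads_before = 0
--         for c in coins:
--             if c == "T":
--                 tails += 1
--             yield tails + total_heads - heads_before
--             if c == "H":
--                 heads_before += 1
--     return min(values()) - 1
-- ===== Notes on version B (the rewrite author's own statement) =====
-- stated objective: simpler
-- what changed: B replaces A's two auxiliary arrays (tails-prefix built forward, heads-postfix built by a backward index loop) and the final zip with a single forward pass over running scalar counters, using heads_postfix[i] = totalH - heads_before[i]; no arrays and no backward loop remain.
import Mathlib
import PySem

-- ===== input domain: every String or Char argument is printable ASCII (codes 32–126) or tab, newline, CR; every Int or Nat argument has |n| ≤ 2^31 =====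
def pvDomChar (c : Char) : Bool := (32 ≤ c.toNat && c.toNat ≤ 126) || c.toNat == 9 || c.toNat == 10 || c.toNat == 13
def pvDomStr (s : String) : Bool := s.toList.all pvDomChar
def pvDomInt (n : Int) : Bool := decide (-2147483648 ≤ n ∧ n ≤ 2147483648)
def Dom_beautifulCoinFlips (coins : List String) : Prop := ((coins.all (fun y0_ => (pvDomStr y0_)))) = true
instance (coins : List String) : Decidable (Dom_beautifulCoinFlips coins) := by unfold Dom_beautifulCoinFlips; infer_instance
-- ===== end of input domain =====

-- B: one forward pass with scalar running counters (heads_postfix obtained as totalH - heads_before) instead of A's two arrays and backward loop; objective: simpler.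
-- ===== PORT A =====
-- running tails-prefix list: tp count cs appends the updated count for each element (A's first loop)
def pvTp (count : Int) : List String → List Int
  | [] => []
  | c :: cs =>
    let count' := if c = "T" then count + 1 else count
    count' :: pvTp count' cs

-- heads-postfix list: A's backward index loop, written as the structural right-to-left recursion
-- (each cell = running H-count of the suffix from that index)
def pvHp : List String → List Int
  | [] => []
  | c :: cs => ((if c = "H" then (1:Int) else 0) + (pvHp cs).headD 0) :: pvHp cs

def beautifulCoinFlips (coins : List String) : Int :=
  let tails_prefix := pvTp 0 coins
  let heads_postfix := pvHp coins
  match PySem.List.min? (List.zipWith (· + ·) tails_prefix heads_postfix) (fun x => x) with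
  | some m => m - 1
  | none => 0  -- unreachable under Pre_: Python's min raises ValueError on the empty list

-- ===== PORT B =====
-- B's generator: yields tails + totalH - heads_before per element
def pvVals (totalH tails headsBefore : Int) : List String → List Int
  | [] => []
  | c :: cs =>
    let tails' := if c = "T" then tails + 1 else tails
    (tails' + totalH - headsBefore) ::
      pvVals totalH tails' (if c = "H" then headsBefore + 1 else headsBefore) cs

def beautifulCoinFlips_alt (coins : List String) : Int :=
  let totalH : Int := PySem.List.count coins "H"
  match PySem.List.min? (pvVals totalH 0 0 coins) (fun x => x) with
  | some m => m - 1
  | none => 0  -- unreachable under Pre_: min of an empty generator raises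

-- ===== PRECONDITION & SPEC =====
-- Both A and B raise ValueError (min of empty sequence) on the empty list; Pre_ excludes exactly that input.
def Pre_beautifulCoinFlips (coins : List String) : Prop := coins ≠ []
instance (coins : List String) : Decidable (Pre_beautifulCoinFlips coins) := by unfold Pre_beautifulCoinFlips; infer_instance
def pvWitness_beautifulCoinFlips : List String := ["H", "T", "H"]
def Spec_beautifulCoinFlips (coins : List String) (out : Int) : Prop := out = beautifulCoinFlips_alt coins
instance (coins : List String) (out : Int) : Decidable (Spec_beautifulCoinFlips coins out) := by unfold Spec_beautifulCoinFlips; infer_instance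

-- ===== CLAIM (what is proved, stated in full; the proofs are below) =====
def Claim_equal_beautifulCoinFlips : Prop := ∀ (coins : List String), Dom_beautifulCoinFlips coins → Pre_beautifulCoinFlips coins → Spec_beautifulCoinFlips coins (beautifulCoinFlips coins)

-- ===== LEMMAS AND PROOFS =====
-- suffix H-count as an Int
def pvHc : List String → Int
  | [] => 0
  | c :: cs => (if c = "H" then 1 else 0) + pvHc cs

theorem pvHp_headD (cs : List String) : (pvHp cs).headD 0 = pvHc cs := by
  induction cs with
  | nil => rfl
  | cons c cs ih => simp only [pvHp, List.headD_cons, pvHc, ih]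

theorem pvHp_cons (c : String) (cs : List String) :
    pvHp (c :: cs) = pvHc (c :: cs) :: pvHp cs := by
  simp only [pvHp, pvHc, pvHp_headD]

theorem pvCount_eq_hc (cs : List String) : (PySem.List.count cs "H" : Int) = pvHc cs := by
  induction cs with
  | nil => rfl
  | cons c cs ih =>
    by_cases h : c = "H" <;>
      simp [PySem.List.count, List.count_cons, pvHc, h, ← ih] <;> omega

theorem pvVals_eq_zip (cs : List String) (t hB : Int) :
    List.zipWith (· + ·) (pvTp t cs) (pvHp cs) = pvVals (hB + pvHc cs) t hB cs := by
  induction cs generalizing t hB with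
  | nil => rfl
  | cons c cs ih =>
    rw [pvHp_cons]
    simp only [pvTp, pvVals, List.zipWith_cons_cons]
    have h1 : (if c = "T" then t + 1 else t) + pvHc (c :: cs)
        = (if c = "T" then t + 1 else t) + (hB + pvHc (c :: cs)) - hB := by ring
    have h2 : hB + pvHc (c :: cs) = (if c = "H" then hB + 1 else hB) + pvHc cs := by
      by_cases h : c = "H" <;> simp [pvHc, h] <;> ring
    rw [h1, h2, ih]

theorem pvVals_eq_zip0 (cs : List String) :
    List.zipWith (· + ·) (pvTp 0 cs) (pvHp cs) = pvVals (pvHc cs) 0 0 cs := by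
  simpa using pvVals_eq_zip cs 0 0

-- ===== VERDICT (by name: the statement is the Claim_ definition above) =====
theorem beautifulCoinFlips_spec : Claim_equal_beautifulCoinFlips := by
  intro coins _ _
  unfold Spec_beautifulCoinFlips beautifulCoinFlips beautifulCoinFlips_alt
  simp only [pvCount_eq_hc, pvVals_eq_zip0]
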